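-- pv_equiv track=rewrite | github.com/CDMY0417/Tool_MATH | function_tools/function_total/zq9oei.py | units_digit_of_power
-- ===== SOURCE A (Python) =====
-- def units_digit_of_power(a: int, b: int) -> int:
--     cycle = []
--     current = a % 10
--     while current not in cycle:
--         cycle.append(current)
--         current = (current * a) % 10
--     index = (b - 1) % len(cycle)
--     return cycle[index]
-- ===== SOURCE B (Python) =====
-- def units_digit_of_power(a: int, b: int) -> int:
--     return pow(a % 10, (b - 1) % 4 + 1, 10)
-- ===== Notes on version B (the rewrite author's own statement) =====
-- stated objective: simpler
-- what changed: Replaces A's iterative cycle-building and list indexing with a one-line closed-form modular power using the fact that units-digit cycles have period dividing 4.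
import Mathlib
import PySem

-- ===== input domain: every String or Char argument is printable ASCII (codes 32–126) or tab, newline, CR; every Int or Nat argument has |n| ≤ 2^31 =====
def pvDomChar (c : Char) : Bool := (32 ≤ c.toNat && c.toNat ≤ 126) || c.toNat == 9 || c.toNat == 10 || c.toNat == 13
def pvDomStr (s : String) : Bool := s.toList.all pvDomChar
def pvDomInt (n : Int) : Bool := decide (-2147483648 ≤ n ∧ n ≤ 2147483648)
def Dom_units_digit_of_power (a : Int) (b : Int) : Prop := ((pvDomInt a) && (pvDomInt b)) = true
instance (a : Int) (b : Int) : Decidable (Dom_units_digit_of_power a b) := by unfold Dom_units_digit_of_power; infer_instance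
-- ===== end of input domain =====

-- B replaces A's iterative units-digit cycle construction with the closed form
-- pow(a % 10, (b-1) % 4 + 1, 10) (cycle period divides 4); objective: simpler.


-- ===== PORT A =====
-- while loop of A; the fuel 11 is a totality guard only: the cycle list holds
-- distinct residues mod 10, so the loop exits within 10 appends.
def udpLoop (a : Int) : Nat → Int → List Int → List Int
  | 0, _, cycle => cycle
  | fuel + 1, current, cycle =>
    if current ∈ cycle then cycle
    else udpLoop a fuel (PySem.Int.mod (current * a) 10) (cycle ++ [current])

def units_digit_of_power (a : Int) (b : Int) : Int :=
  let cycle := udpLoop a 11 (PySem.Int.mod a 10) []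
  let index := PySem.Int.mod (b - 1) (cycle.length : Int)
  -- cycle[index]: never out of range (cycle nonempty, 0 ≤ index < len), so getD's 0 is dead
  (PySem.List.pyGet? cycle index).getD 0

-- ===== PORT B =====
def units_digit_of_power_alt (a : Int) (b : Int) : Int :=
  PySem.Int.mod ((PySem.Int.mod a 10) ^ (PySem.Int.mod (b - 1) 4 + 1).toNat) 10

-- ===== PRECONDITION & SPEC =====
def Spec_units_digit_of_power (a : Int) (b : Int) (out : Int) : Prop := out = units_digit_of_power_alt a b
instance (a : Int) (b : Int) (out : Int) : Decidable (Spec_units_digit_of_power a b out) := by unfold Spec_units_digit_of_power; infer_instance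

-- ===== CLAIM (what is proved, stated in full; the proofs are below) =====
def Claim_equal_units_digit_of_power : Prop := ∀ (a : Int) (b : Int), Dom_units_digit_of_power a b → Spec_units_digit_of_power a b (units_digit_of_power a b)

-- ===== LEMMAS AND PROOFS =====

-- the loop uses a only through multiplication mod 10, so a may be replaced by a % 10
theorem udpLoop_mod (a : Int) (fuel : Nat) (cur : Int) (cyc : List Int) :
    udpLoop a fuel cur cyc = udpLoop (PySem.Int.mod a 10) fuel cur cyc := by
  have h10 : (0:Int) < 10 := by norm_num
  induction fuel generalizing cur cyc with
  | zero => rfl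
  | succ n ih =>
    simp only [udpLoop]
    split
    · rfl
    · rw [ih]
      congr 1
      simp only [PySem.Int.mod_eq_emod_of_pos h10]
      conv_rhs => rw [Int.mul_emod, Int.emod_emod_of_dvd a (dvd_refl (10:Int)), ← Int.mul_emod]

-- x % L = (x % 4) % L whenever 0 < L ∣ 4 (Python floor mod, positive moduli)
theorem udp_modmod (x L : Int) (hdvd : L ∣ 4) (hpos : 0 < L) :
    PySem.Int.mod x L = PySem.Int.mod (PySem.Int.mod x 4) L := by
  rw [PySem.Int.mod_eq_emod_of_pos hpos, PySem.Int.mod_eq_emod_of_pos hpos,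
    PySem.Int.mod_eq_emod_of_pos (by norm_num : (0:Int) < 4), Int.emod_emod_of_dvd x hdvd]

-- reduces the per-residue goal to finitely checkable facts about the literal cycle C
theorem udp_key (r b : Int) (C : List Int)
    (hC : udpLoop r 11 r [] = C) (hpos : 0 < (C.length : Int)) (hdvd : (C.length : Int) ∣ 4)
    (hall : ∀ m : Int, 0 ≤ m → m < 4 →
      (PySem.List.pyGet? C (PySem.Int.mod m (C.length : Int))).getD 0
        = PySem.Int.mod (r ^ (m + 1).toNat) 10) :
    (PySem.List.pyGet? (udpLoop r 11 r [])
        (PySem.Int.mod (b - 1) ((udpLoop r 11 r []).length : Int))).getD 0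
      = PySem.Int.mod (r ^ (PySem.Int.mod (b - 1) 4 + 1).toNat) 10 := by
  have h4 : (0:Int) < 4 := by norm_num
  rw [hC, udp_modmod (b - 1) _ hdvd hpos]
  exact hall _ (by rw [PySem.Int.mod_eq_emod_of_pos h4]; exact Int.emod_nonneg _ (by norm_num))
    (by rw [PySem.Int.mod_eq_emod_of_pos h4]; exact Int.emod_lt_of_pos _ h4)

theorem udp_core (r b : Int) (hr0 : 0 ≤ r) (hr9 : r < 10) :
    (PySem.List.pyGet? (udpLoop r 11 r [])
        (PySem.Int.mod (b - 1) ((udpLoop r 11 r []).length : Int))).getD 0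
      = PySem.Int.mod (r ^ (PySem.Int.mod (b - 1) 4 + 1).toNat) 10 := by
  interval_cases r <;>
    exact udp_key _ b _ rfl (by decide) (by decide)
      (by intro m h0 h4; interval_cases m <;> decide)

-- ===== VERDICT (by name: the statement is the Claim_ definition above) =====
theorem units_digit_of_power_spec : Claim_equal_units_digit_of_power := by
  intro a b _
  show _ = _
  have h10 : (0:Int) < 10 := by norm_num
  unfold units_digit_of_power units_digit_of_power_alt
  rw [udpLoop_mod]
  exact udp_core (PySem.Int.mod a 10) b
    (by rw [PySem.Int.mod_eq_emod_of_pos h10]; exact Int.emod_nonneg _ (by norm_num))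
    (by rw [PySem.Int.mod_eq_emod_of_pos h10]; exact Int.emod_lt_of_pos _ h10)
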